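-- pv_equiv track=rewrite | github.com/VinaySuhirthan/trial-version | backend.py | normalize_day
-- ===== SOURCE A (Python) =====
-- from typing import List, Dict, Tuple, Optional, Set, Any
--
-- DAYS_ORDER = ["Monday", "Tuesday", "Wednesday", "Thursday", "Friday", "Saturday"]
--
-- DAY_ALIASES = {
--     "mon": "Monday", "monday": "Monday",
--     "tue": "Tuesday", "tuesday": "Tuesday",
--     "wed": "Wednesday", "wednesday": "Wednesday",
--     "thu": "Thursday", "thursday": "Thursday",
--     "fri": "Friday", "friday": "Friday",
--     "sat": "Saturday", "saturday": "Saturday"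
-- }
--
-- def normalize_day(day: str) -> Optional[str]:
--     """Normalize day name."""
--     if not day:
--         return None
--     day_lower = day.strip().lower()
--     for full_day in DAYS_ORDER:
--         if full_day.lower() == day_lower:
--             return full_day
--     for alias, full_day in DAY_ALIASES.items():
--         if alias == day_lower:
--             return full_day
--     if len(day_lower) >= 3:
--         return DAY_ALIASES.get(day_lower[:3])
--     return None
-- ===== SOURCE B (Python) =====
-- DAY_ALIASES = {
--     "mon": "Monday", "monday": "Monday",
--     "tue": "Tuesday", "tuesday": "Tuesday",
--     "wed": "Wednesday", "wednesday": "Wednesday",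
--     "thu": "Thursday", "thursday": "Thursday",
--     "fri": "Friday", "friday": "Friday",
--     "sat": "Saturday", "saturday": "Saturday"
-- }
--
-- def normalize_day(day):
--     """Normalize day name: one lookup of the 3-letter prefix."""
--     if not day:
--         return None
--     return DAY_ALIASES.get(day.strip().lower()[:3])
-- ===== Notes on version B (the rewrite author's own statement) =====
-- stated objective: simpler
-- what changed: B collapses A's three phases (scan of DAYS_ORDER, scan of DAY_ALIASES items, length-guarded 3-char-prefix lookup) into a single dict lookup keyed by the 3-character prefix, which agrees because every alias shares its first three letters with its canonical day.
import Mathlib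
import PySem

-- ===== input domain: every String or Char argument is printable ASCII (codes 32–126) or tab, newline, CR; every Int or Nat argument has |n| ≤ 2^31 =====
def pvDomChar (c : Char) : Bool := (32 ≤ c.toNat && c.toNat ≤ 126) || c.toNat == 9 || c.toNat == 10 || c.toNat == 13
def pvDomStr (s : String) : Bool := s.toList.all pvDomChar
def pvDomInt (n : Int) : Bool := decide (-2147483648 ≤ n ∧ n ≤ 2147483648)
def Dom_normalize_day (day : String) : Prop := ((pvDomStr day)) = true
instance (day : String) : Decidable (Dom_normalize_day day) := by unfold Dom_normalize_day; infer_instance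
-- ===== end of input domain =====

-- B collapses A's three scans (full-name loop, alias loop, guarded prefix lookup) into one dict lookup on the 3-char prefix; objective: simpler.


-- ===== PORT A =====
def pvDaysOrder : List String :=
  ["Monday", "Tuesday", "Wednesday", "Thursday", "Friday", "Saturday"]

def pvDayAliases : PySem.Dict String String := PySem.Dict.ofList
  [("mon", "Monday"), ("monday", "Monday"),
   ("tue", "Tuesday"), ("tuesday", "Tuesday"),
   ("wed", "Wednesday"), ("wednesday", "Wednesday"),
   ("thu", "Thursday"), ("thursday", "Thursday"),
   ("fri", "Friday"), ("friday", "Friday"),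
   ("sat", "Saturday"), ("saturday", "Saturday")]

-- 'for full_day in DAYS_ORDER: if full_day.lower() == day_lower: return full_day'
def pvScanFull (dayLower : String) : List String → Option String
  | [] => none
  | f :: rest => if PySem.Str.lower f == dayLower then some f else pvScanFull dayLower rest

-- 'for alias, full_day in DAY_ALIASES.items(): if alias == day_lower: return full_day'
def pvScanAlias (dayLower : String) : List (String × String) → Option String
  | [] => none
  | (a, f) :: rest => if a == dayLower then some f else pvScanAlias dayLower rest

def normalize_day (day : String) : Option String :=
  if day == "" then none
  else
    let dayLower := PySem.Str.lower (PySem.Str.strip day)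
    match pvScanFull dayLower pvDaysOrder with
    | some f => some f
    | none =>
      match pvScanAlias dayLower pvDayAliases.items with
      | some f => some f
      | none =>
        if 3 ≤ PySem.Str.len dayLower then
          pvDayAliases.get? (PySem.Str.slice dayLower none (some 3))
        else none

-- ===== PORT B =====
def pvDayAliasesB : PySem.Dict String String := PySem.Dict.ofList
  [("mon", "Monday"), ("monday", "Monday"),
   ("tue", "Tuesday"), ("tuesday", "Tuesday"),
   ("wed", "Wednesday"), ("wednesday", "Wednesday"),
   ("thu", "Thursday"), ("thursday", "Thursday"),
   ("fri", "Friday"), ("friday", "Friday"),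
   ("sat", "Saturday"), ("saturday", "Saturday")]

def normalize_day_alt (day : String) : Option String :=
  if day == "" then none
  else pvDayAliasesB.get? (PySem.Str.slice (PySem.Str.lower (PySem.Str.strip day)) none (some 3))

-- ===== PRECONDITION & SPEC =====
def Spec_normalize_day (day : String) (out : Option String) : Prop := out = normalize_day_alt day
instance (day : String) (out : Option String) : Decidable (Spec_normalize_day day out) := by unfold Spec_normalize_day; infer_instance

-- ===== CLAIM (what is proved, stated in full; the proofs are below) =====
def Claim_equal_normalize_day : Prop := ∀ (day : String), Dom_normalize_day day → Spec_normalize_day day (normalize_day day)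

-- ===== LEMMAS AND PROOFS =====

-- the common core: A's three phases on the already-stripped-and-lowered string agree with B's single lookup
lemma pv_core (s : String) :
    (match pvScanFull s pvDaysOrder with
     | some f => some f
     | none =>
       match pvScanAlias s pvDayAliases.items with
       | some f => some f
       | none =>
         if 3 ≤ PySem.Str.len s then
           pvDayAliases.get? (PySem.Str.slice s none (some 3))
         else none) = pvDayAliasesB.get? (PySem.Str.slice s none (some 3)) := by
  by_cases h1 : s = "mon";      · subst h1; decide
  by_cases h2 : s = "monday";   · subst h2; decide
  by_cases h3 : s = "tue";      · subst h3; decide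
  by_cases h4 : s = "tuesday";  · subst h4; decide
  by_cases h5 : s = "wed";      · subst h5; decide
  by_cases h6 : s = "wednesday";· subst h6; decide
  by_cases h7 : s = "thu";      · subst h7; decide
  by_cases h8 : s = "thursday"; · subst h8; decide
  by_cases h9 : s = "fri";      · subst h9; decide
  by_cases h10 : s = "friday";  · subst h10; decide
  by_cases h11 : s = "sat";     · subst h11; decide
  by_cases h12 : s = "saturday";· subst h12; decide
  -- s matches no alias and no lowered full name: both of A's scans fail
  have l1 : PySem.Str.lower "Monday" = "monday" := rfl
  have l2 : PySem.Str.lower "Tuesday" = "tuesday" := rfl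
  have l3 : PySem.Str.lower "Wednesday" = "wednesday" := rfl
  have l4 : PySem.Str.lower "Thursday" = "thursday" := rfl
  have l5 : PySem.Str.lower "Friday" = "friday" := rfl
  have l6 : PySem.Str.lower "Saturday" = "saturday" := rfl
  have e1 : pvScanFull s pvDaysOrder = none := by
    simp [pvDaysOrder, pvScanFull, l1, l2, l3, l4, l5, l6, beq_iff_eq,
      Ne.symm h2, Ne.symm h4, Ne.symm h6, Ne.symm h8, Ne.symm h10, Ne.symm h12]
  have hitems : pvDayAliases.items =
      [("mon", "Monday"), ("monday", "Monday"),
       ("tue", "Tuesday"), ("tuesday", "Tuesday"),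
       ("wed", "Wednesday"), ("wednesday", "Wednesday"),
       ("thu", "Thursday"), ("thursday", "Thursday"),
       ("fri", "Friday"), ("friday", "Friday"),
       ("sat", "Saturday"), ("saturday", "Saturday")] := rfl
  have e2 : pvScanAlias s pvDayAliases.items = none := by
    simp [hitems, pvScanAlias, beq_iff_eq,
      Ne.symm h1, Ne.symm h2, Ne.symm h3, Ne.symm h4, Ne.symm h5, Ne.symm h6,
      Ne.symm h7, Ne.symm h8, Ne.symm h9, Ne.symm h10, Ne.symm h11, Ne.symm h12]
  simp only [e1, e2]
  by_cases hl : (3 : Int) ≤ PySem.Str.len s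
  · rw [if_pos hl]; rfl
  · rw [if_neg hl]
    have hlen : s.toList.length < 3 := by
      have := PySem.Str.len_eq s; omega
    have hs3 : PySem.Str.slice s none (some 3) = s := by
      apply String.ext
      rw [PySem.Str.toList_slice, PySem.Chars.slice_eq_listSlice,
        PySem.List.slice_to (s.toList) (by norm_num)]
      exact List.take_of_length_le (by omega)
    rw [hs3]
    have hB : pvDayAliasesB = PySem.Dict.mk
      [("mon", "Monday"), ("monday", "Monday"),
       ("tue", "Tuesday"), ("tuesday", "Tuesday"),
       ("wed", "Wednesday"), ("wednesday", "Wednesday"),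
       ("thu", "Thursday"), ("thursday", "Thursday"),
       ("fri", "Friday"), ("friday", "Friday"),
       ("sat", "Saturday"), ("saturday", "Saturday")] := rfl
    rw [hB]
    simp [PySem.Dict.get?, beq_iff_eq,
      Ne.symm h1, Ne.symm h2, Ne.symm h3, Ne.symm h4, Ne.symm h5, Ne.symm h6,
      Ne.symm h7, Ne.symm h8, Ne.symm h9, Ne.symm h10, Ne.symm h11, Ne.symm h12]

-- ===== VERDICT (by name: the statement is the Claim_ definition above) =====
theorem normalize_day_spec : Claim_equal_normalize_day := by
  intro day _
  unfold Spec_normalize_day normalize_day normalize_day_alt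
  by_cases hd : day == ""
  · rw [if_pos hd, if_pos hd]
  · rw [if_neg hd, if_neg hd]
    exact pv_core (PySem.Str.lower (PySem.Str.strip day))
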